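-- pv_equiv track=rewrite | github.com/wkd-woo/coding-test | skt tworx.py | solution
-- ===== SOURCE A (Python) =====
-- def solution(periods, payments, estimates):
--     answer, vip = [0, 0], {}
--     for i, (period, payment) in enumerate(zip(periods, payments)):
--         if period >= 60 and sum(payment) >= 600000:
--             vip[i] = [True]
--         elif 24 <= period < 60 and sum(payment) >= 900000:
--             vip[i] = [True]
--         else:
--             vip[i] = [False]
--
--     for i, (period, payment, estimate) in enumerate(zip(periods, payments, estimates)):
--         if period + 1 >= 60 and sum(payment[1:] + [estimate]) >= 600000:
--             vip[i] += [True]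
--         elif 24 <= period + 1< 60 and sum(payment[1:] + [estimate]) >= 900000:
--             vip[i] += [True]
--         else:
--             vip[i] += [False]
--
--     for each in vip:
--         if not vip[each][0] and vip[each][1]:
--             answer[0] += 1
--         elif vip[each][0] and not vip[each][1]:
--             answer[1] += 1
--
--     return answer
-- ===== SOURCE B (Python) =====
-- def is_vip(period, total):
--     return period >= 60 and total >= 600000 or 24 <= period < 60 and total >= 900000
--
--
-- def solution(periods, payments, estimates):
--     triples = list(zip(periods, payments, estimates))
--     cur = sum(is_vip(p, sum(pay)) for p, pay, _ in triples)
--     est = sum(is_vip(p + 1, sum(pay[1:]) + e) for p, pay, e in triples)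
--     both = sum(is_vip(p, sum(pay)) and is_vip(p + 1, sum(pay[1:]) + e)
--                for p, pay, e in triples)
--     return [est - both, cur - both]
-- ===== Notes on version B (the rewrite author's own statement) =====
-- stated objective: alternative
-- what changed: B replaces A's per-customer transition branching (build a dict of [current,estimated] flag pairs in two passes, then scan it testing the not-vip-then-vip / vip-then-not-vip branches) by inclusion-exclusion counting: it tallies three independent cardinalities - current VIPs, estimated VIPs, and customers VIP in both - and returns [est-both, cur-both]; no dict and no transition test.
import Mathlib
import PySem

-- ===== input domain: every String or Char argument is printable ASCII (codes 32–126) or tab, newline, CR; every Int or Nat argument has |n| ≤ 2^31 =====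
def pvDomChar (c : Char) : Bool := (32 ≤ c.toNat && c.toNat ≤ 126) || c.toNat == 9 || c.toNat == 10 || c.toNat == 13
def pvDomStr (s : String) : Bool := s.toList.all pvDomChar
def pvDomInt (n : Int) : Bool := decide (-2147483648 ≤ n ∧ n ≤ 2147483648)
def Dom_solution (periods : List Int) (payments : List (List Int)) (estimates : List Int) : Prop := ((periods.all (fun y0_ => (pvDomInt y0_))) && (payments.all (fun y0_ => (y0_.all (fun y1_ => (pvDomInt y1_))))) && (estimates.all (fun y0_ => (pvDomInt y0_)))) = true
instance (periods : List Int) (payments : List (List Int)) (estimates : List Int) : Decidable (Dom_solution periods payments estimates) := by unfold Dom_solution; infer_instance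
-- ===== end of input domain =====

-- B replaces A's dict-of-flag-pairs + transition-branch scan by inclusion-exclusion counting
-- (three independent tallies: current VIPs, estimated VIPs, both; answer = [est-both, cur-both]);
-- same return value wherever A returns (Pre_ excludes only the inputs on which A raises IndexError).

-- ===== PORT A =====
-- zip of three lists (Python's zip(a, b, c)); shared by both ports
def pvZip3 {α β γ : Type} : List α → List β → List γ → List (α × β × γ)
  | a :: as, b :: bs, c :: cs => (a, b, c) :: pvZip3 as bs cs
  | _, _, _ => []

def solution (periods : List Int) (payments : List (List Int)) (estimates : List Int) : List Int :=
  -- first loop: vip[i] = [True/False]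
  let vip1 : PySem.Dict Int (List Bool) :=
    (PySem.List.enumerate (periods.zip payments) 0).foldl
      (fun d t =>
        if t.2.1 ≥ 60 ∧ t.2.2.sum ≥ 600000 then d.insert t.1 [true]
        else if 24 ≤ t.2.1 ∧ t.2.1 < 60 ∧ t.2.2.sum ≥ 900000 then d.insert t.1 [true]
        else d.insert t.1 [false]) PySem.Dict.empty
  -- second loop: vip[i] += [True/False]  (key i always present: the first loop inserted it;
  -- modify with default [] therefore coincides with Python's vip[i] = vip[i] + [...])
  let vip2 : PySem.Dict Int (List Bool) :=
    (PySem.List.enumerate (pvZip3 periods payments estimates) 0).foldl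
      (fun d t =>
        if t.2.1 + 1 ≥ 60 ∧ (PySem.List.slice t.2.2.1 (some 1) none ++ [t.2.2.2]).sum ≥ 600000 then
          d.modify t.1 [] (· ++ [true])
        else if 24 ≤ t.2.1 + 1 ∧ t.2.1 + 1 < 60 ∧ (PySem.List.slice t.2.2.1 (some 1) none ++ [t.2.2.2]).sum ≥ 900000 then
          d.modify t.1 [] (· ++ [true])
        else d.modify t.1 [] (· ++ [false])) vip1
  -- third loop: for each in vip (keys in insertion order).  vip[each][1] raises IndexError in
  -- Python when estimates is too short; Pre_ excludes exactly those inputs, so the defaults of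
  -- getD/pyGetD are never the result being claimed.
  let ans : Int × Int := vip2.keys.foldl
      (fun (a : Int × Int) k =>
        let v := vip2.getD k []
        if ¬ (PySem.List.pyGetD v 0 false) = true ∧ (PySem.List.pyGetD v 1 false) = true then (a.1 + 1, a.2)
        else if (PySem.List.pyGetD v 0 false) = true ∧ ¬ (PySem.List.pyGetD v 1 false) = true then (a.1, a.2 + 1)
        else a) (0, 0)
  [ans.1, ans.2]

-- ===== PORT B =====
def pvIsVip (period : Int) (total : Int) : Bool :=
  decide ((period ≥ 60 ∧ total ≥ 600000) ∨ (24 ≤ period ∧ period < 60 ∧ total ≥ 900000))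

-- Python's sum over booleans counts the Trues
def pvBoolInt (b : Bool) : Int := if b then 1 else 0

def pvCurInd (t : Int × List Int × Int) : Int := pvBoolInt (pvIsVip t.1 t.2.1.sum)
def pvEstInd (t : Int × List Int × Int) : Int :=
  pvBoolInt (pvIsVip (t.1 + 1) ((t.2.1.drop 1).sum + t.2.2))
def pvBothInd (t : Int × List Int × Int) : Int :=
  pvBoolInt (pvIsVip t.1 t.2.1.sum && pvIsVip (t.1 + 1) ((t.2.1.drop 1).sum + t.2.2))

def solution_alt (periods : List Int) (payments : List (List Int)) (estimates : List Int) : List Int :=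
  let triples := pvZip3 periods payments estimates
  let cur := (triples.map pvCurInd).sum
  let est := (triples.map pvEstInd).sum
  let both := (triples.map pvBothInd).sum
  [est - both, cur - both]

-- ===== PRECONDITION & SPEC =====
-- Pre_ excludes exactly the inputs on which A raises IndexError (estimates shorter than
-- zip(periods, payments): the trailing dict entries have a single flag and vip[each][1] raises).
def Pre_solution (periods : List Int) (payments : List (List Int)) (estimates : List Int) : Prop :=
  min periods.length payments.length ≤ estimates.length
instance (periods : List Int) (payments : List (List Int)) (estimates : List Int) : Decidable (Pre_solution periods payments estimates) := by unfold Pre_solution; infer_instance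

def pvWitness_solution : List Int × List (List Int) × List Int := ([30, 61], [[450000, 450000], [600000]], [1, 2])

def Spec_solution (periods : List Int) (payments : List (List Int)) (estimates : List Int) (out : List Int) : Prop := out = solution_alt periods payments estimates
instance (periods : List Int) (payments : List (List Int)) (estimates : List Int) (out : List Int) : Decidable (Spec_solution periods payments estimates out) := by unfold Spec_solution; infer_instance

-- ===== CLAIM (what is proved, stated in full; the proofs are below) =====
def Claim_equal_solution : Prop := ∀ (periods : List Int) (payments : List (List Int)) (estimates : List Int), Dom_solution periods payments estimates → Pre_solution periods payments estimates → Spec_solution periods payments estimates (solution periods payments estimates)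

-- ===== LEMMAS AND PROOFS =====

-- when estimates is long enough, zip(periods, payments) is the projection of zip3
lemma pvZip3_zip (p : List Int) (q : List (List Int)) (r : List Int)
    (h : min p.length q.length ≤ r.length) :
    p.zip q = (pvZip3 p q r).map (fun t => (t.1, t.2.1)) := by
  induction p generalizing q r with
  | nil => simp [pvZip3]
  | cons a as ih =>
    cases q with
    | nil => simp [pvZip3]
    | cons b bs =>
      cases r with
      | nil => simp only [List.length_nil, List.length_cons] at h; omega
      | cons c cs =>
        simp only [pvZip3, List.zip_cons_cons, List.map_cons]
        refine congrArg _ (ih bs cs ?_)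
        simp only [List.length_cons] at h; omega

lemma pvEnumerate_map {α β : Type} (f : α → β) (xs : List α) (s : Int) :
    PySem.List.enumerate (xs.map f) s = (PySem.List.enumerate xs s).map (fun t => (t.1, f t.2)) := by
  induction xs generalizing s with
  | nil => simp [PySem.List.enumerate_nil]
  | cons x xs ih => simp [PySem.List.enumerate_cons, ih]

-- a modify-loop leaves untouched keys alone
lemma pvN {σ : Type} (f : Int × σ → Bool) (l : List (Int × σ)) (d : PySem.Dict Int (List Bool))
    (j : Int) (hj : j ∉ l.map (·.1)) :
    (l.foldl (fun d t => d.modify t.1 [] (· ++ [f t])) d).getD j [] = d.getD j [] := by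
  induction l generalizing d with
  | nil => rfl
  | cons t l ih =>
    simp only [List.map_cons, List.mem_cons] at hj
    push Not at hj
    simp only [List.foldl_cons]
    rw [ih _ hj.2, PySem.Dict.getD_modify_of_ne _ _ _ hj.1]

-- a modify-loop over distinct keys applies its update once at each key
lemma pvM {σ : Type} (f : Int × σ → Bool) (l : List (Int × σ)) (d : PySem.Dict Int (List Bool))
    (hnd : (l.map (·.1)).Nodup) (t : Int × σ) (ht : t ∈ l) :
    (l.foldl (fun d t => d.modify t.1 [] (· ++ [f t])) d).getD t.1 [] = d.getD t.1 [] ++ [f t] := by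
  induction l generalizing d with
  | nil => cases ht
  | cons u l ih =>
    simp only [List.map_cons, List.nodup_cons] at hnd
    simp only [List.foldl_cons]
    rcases List.mem_cons.mp ht with h | h
    · subst h
      rw [pvN f l _ t.1 hnd.1, PySem.Dict.getD_modify_self]
    · have hne : t.1 ≠ u.1 := by
        intro he; exact hnd.1 (he ▸ List.mem_map_of_mem h)
      rw [ih _ hnd.2 h, PySem.Dict.getD_modify_of_ne _ _ _ hne]

lemma pvSet_update_self (K : List Int) : PySem.Set.update K K = K := by
  rw [PySem.Set.update_eq_append_filter]
  have : (PySem.Set.ofList K).filter (fun y => !(PySem.Set.contains K y)) = [] := by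
    apply List.filter_eq_nil_iff.mpr
    intro y hy
    simpa using (PySem.Set.mem_ofList K y).mp hy
  rw [this, List.append_nil]

-- the value A's first loop stores at index i
def pvVal1 (s : Int × List Int) : List Bool :=
  if s.1 ≥ 60 ∧ s.2.sum ≥ 600000 then [true]
  else if 24 ≤ s.1 ∧ s.1 < 60 ∧ s.2.sum ≥ 900000 then [true] else [false]

-- the flag A's second loop appends at index i
def pvVal2 (s : Int × List Int × Int) : Bool :=
  if s.1 + 1 ≥ 60 ∧ (PySem.List.slice s.2.1 (some 1) none ++ [s.2.2]).sum ≥ 600000 then true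
  else if 24 ≤ s.1 + 1 ∧ s.1 + 1 < 60 ∧ (PySem.List.slice s.2.1 (some 1) none ++ [s.2.2]).sum ≥ 900000 then true
  else false

lemma pvVal1_eq (a : Int) (b : List Int) : pvVal1 (a, b) = [pvIsVip a b.sum] := by
  simp only [pvVal1, pvIsVip]
  split_ifs with h1 h2 <;> simp_all

lemma pvVal2_eq (a : Int) (b : List Int) (e : Int) :
    pvVal2 (a, b, e) = pvIsVip (a + 1) ((b.drop 1).sum + e) := by
  simp only [pvVal2, pvIsVip, PySem.List.slice_from_one, List.sum_append,
    List.sum_cons, List.sum_nil, ← List.drop_one]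
  split_ifs with h1 h2 <;> simp_all

-- A's third-loop body once the dict entry is known to be [cur, est]
def pvStep (a : Int × Int) (t : Int × List Int × Int) : Int × Int :=
  let cur := pvIsVip t.1 t.2.1.sum
  let est := pvIsVip (t.1 + 1) ((t.2.1.drop 1).sum + t.2.2)
  if est && !cur then (a.1 + 1, a.2)
  else if cur && !est then (a.1, a.2 + 1)
  else a

-- the transition fold equals the inclusion-exclusion counts
lemma pvCounts (l : List (Int × List Int × Int)) (u d : Int) :
    l.foldl pvStep (u, d) =
      (u + (l.map pvEstInd).sum - (l.map pvBothInd).sum,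
       d + (l.map pvCurInd).sum - (l.map pvBothInd).sum) := by
  induction l generalizing u d with
  | nil => simp
  | cons t l ih =>
    simp only [List.foldl_cons, List.map_cons, List.sum_cons, pvStep,
      pvCurInd, pvEstInd, pvBothInd, pvBoolInt]
    cases hc : pvIsVip t.1 t.2.1.sum <;>
      cases he : pvIsVip (t.1 + 1) ((t.2.1.drop 1).sum + t.2.2) <;>
      · simp only [ih, Bool.not_true, Bool.not_false, Bool.and_true, Bool.and_false,
          Bool.false_eq_true, if_false, if_true,
          Prod.mk.injEq]
        constructor <;> ring

theorem pvMain (periods : List Int) (payments : List (List Int)) (estimates : List Int)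
    (hpre : Pre_solution periods payments estimates) :
    solution periods payments estimates = solution_alt periods payments estimates := by
  simp only [solution]
  have hf1 : (fun (d : PySem.Dict Int (List Bool)) (t : Int × (Int × List Int)) =>
      if t.2.1 ≥ 60 ∧ t.2.2.sum ≥ 600000 then d.insert t.1 [true]
      else if 24 ≤ t.2.1 ∧ t.2.1 < 60 ∧ t.2.2.sum ≥ 900000 then d.insert t.1 [true]
      else d.insert t.1 [false])
      = fun d t => d.insert t.1 (pvVal1 t.2) := by
    funext d t; simp only [pvVal1]; split_ifs <;> rfl
  have hf2 : (fun (d : PySem.Dict Int (List Bool)) (t : Int × (Int × List Int × Int)) =>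
      if t.2.1 + 1 ≥ 60 ∧ (PySem.List.slice t.2.2.1 (some 1) none ++ [t.2.2.2]).sum ≥ 600000 then
        d.modify t.1 [] (· ++ [true])
      else if 24 ≤ t.2.1 + 1 ∧ t.2.1 + 1 < 60 ∧ (PySem.List.slice t.2.2.1 (some 1) none ++ [t.2.2.2]).sum ≥ 900000 then
        d.modify t.1 [] (· ++ [true])
      else d.modify t.1 [] (· ++ [false]))
      = fun d t => d.modify t.1 [] (· ++ [pvVal2 t.2]) := by
    funext d t; simp only [pvVal2]; split_ifs <;> rfl
  rw [hf1, hf2]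
  set l3 := PySem.List.enumerate (pvZip3 periods payments estimates) 0 with hl3
  set d1 := List.foldl (fun d t => d.insert t.1 (pvVal1 t.2)) PySem.Dict.empty
      (PySem.List.enumerate (periods.zip payments) 0) with hd1
  set d2 := List.foldl (fun d t => d.modify t.1 [] (· ++ [pvVal2 t.2])) d1 l3 with hd2
  have hknodup : (l3.map (fun t => t.1)).Nodup := by
    rw [PySem.List.map_fst_enumerate]; exact PySem.List.nodup_pyRange_one _ _
  have hitems : d1.items = l3.map (fun t => (t.1, pvVal1 (t.2.1, t.2.2.1))) := by
    rw [hd1, pvZip3_zip periods payments estimates hpre, pvEnumerate_map]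
    have hfresh : ∀ a ∈ List.map (fun (t : Int × Int × List Int × Int) => (t.1, t.2.1, t.2.2.1)) l3,
        (PySem.Dict.empty : PySem.Dict Int (List Bool)).contains a.1 = false := by
      intro a _; simp
    have hnod : (List.map (fun (t : Int × Int × List Int) => t.1)
        (List.map (fun (t : Int × Int × List Int × Int) => (t.1, t.2.1, t.2.2.1)) l3)).Nodup := by
      rw [List.map_map]; exact hknodup
    have h := PySem.Dict.items_foldl_insert_fresh _ (fun (t : Int × Int × List Int) => t.1)
      (fun t => pvVal1 t.2) PySem.Dict.empty hfresh hnod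
    refine h.trans ?_
    rw [List.map_map]
    rfl
  have hkeys1 : d1.keys = l3.map (fun t => t.1) := by
    simp only [PySem.Dict.keys, hitems, List.map_map]; rfl
  have hkeys1nd : d1.keys.Nodup := by rw [hkeys1]; exact hknodup
  have hget1 : ∀ t ∈ l3, d1.getD t.1 [] = pvVal1 (t.2.1, t.2.2.1) := by
    intro t ht
    exact PySem.Dict.getD_of_mem_items d1
      (by rw [hitems]; exact List.mem_map_of_mem ht) hkeys1nd []
  have hget2 : ∀ t ∈ l3, d2.getD t.1 [] = pvVal1 (t.2.1, t.2.2.1) ++ [pvVal2 t.2] := by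
    intro t ht
    have hM := pvM (fun (t : Int × Int × List Int × Int) => pvVal2 t.2) l3 d1 hknodup t ht
    rw [hd2]
    exact hM.trans (by rw [hget1 t ht])
  have hkeys2 : d2.keys = l3.map (fun t => t.1) := by
    have h2 := PySem.Dict.keys_foldl_modify_key l3 (fun (t : Int × Int × List Int × Int) => t.1)
      ([] : List Bool) (fun _ t v => v ++ [pvVal2 t.2]) d1
    rw [hd2]
    exact h2.trans (by rw [hkeys1, pvSet_update_self])
  -- the third loop is the transition fold pvStep over the triples
  have hA : (d2.keys.foldl
      (fun (a : Int × Int) k =>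
        let v := d2.getD k []
        if ¬ (PySem.List.pyGetD v 0 false) = true ∧ (PySem.List.pyGetD v 1 false) = true then (a.1 + 1, a.2)
        else if (PySem.List.pyGetD v 0 false) = true ∧ ¬ (PySem.List.pyGetD v 1 false) = true then (a.1, a.2 + 1)
        else a) (0, 0))
      = l3.foldl (fun a t => pvStep a t.2) (0, 0) := by
    rw [hkeys2, List.foldl_map]
    apply PySem.List.foldl_congr_mem
    intro acc t ht
    rw [hget2 t ht]
    obtain ⟨i, a, b, e⟩ := t
    simp only [pvVal1_eq, pvVal2_eq, pvStep]
    cases pvIsVip a b.sum <;> cases pvIsVip (a + 1) ((List.drop 1 b).sum + e) <;>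
      simp [PySem.List.pyGetD]
  rw [hA]
  have hz : l3.foldl (fun a t => pvStep a t.2) (0, 0)
      = (pvZip3 periods payments estimates).foldl pvStep (0, 0) := by
    conv_rhs => rw [← PySem.List.map_snd_enumerate (pvZip3 periods payments estimates) 0]
    rw [List.foldl_map]
  rw [hz, pvCounts]
  simp only [solution_alt]
  norm_num

-- ===== VERDICT (by name: the statement is the Claim_ definition above) =====
theorem solution_spec : Claim_equal_solution := by
  intro periods payments estimates _ hpre
  exact pvMain periods payments estimates hpre
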